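-- pv_equiv track=rewrite | github.com/zhanghaoran1135/ASVA | asva/data/text_windowing.py | _render_lines
-- ===== SOURCE A (Python) =====
-- GAP_MARKER = "// ..."
--
-- def _render_lines(lines, selected_lines):
--     parts = []
--     prev = None
--     for line_no in selected_lines:
--         if not (1 <= line_no <= len(lines)):
--             continue
--         if prev is not None and line_no != prev + 1:
--             parts.append(GAP_MARKER)
--         parts.append(lines[line_no - 1])
--         prev = line_no
--     return "\n".join(parts)
-- ===== SOURCE B (Python) =====
-- GAP_MARKER = "// ..."
--
-- def _render_lines(lines, selected_lines):
--     n = len(lines)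
--     filt = [ln for ln in selected_lines if 1 <= ln <= n]
--     runs = []
--     for ln in filt:
--         if runs and ln == runs[-1][-1] + 1:
--             runs[-1].append(ln)
--         else:
--             runs.append([ln])
--     sep = "\n" + GAP_MARKER + "\n"
--     return sep.join("\n".join(lines[ln - 1] for ln in run) for run in runs)
-- ===== Notes on version B (the rewrite author's own statement) =====
-- stated objective: alternative
-- what changed: Replaces A's stateful single pass that tracks prev and interleaves gap-marker parts with a group-into-runs decomposition: filter the in-range line numbers, group them into contiguous runs, render each run joined by newlines, and join the runs with '\n// ...\n' as separator.
import Mathlib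
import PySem

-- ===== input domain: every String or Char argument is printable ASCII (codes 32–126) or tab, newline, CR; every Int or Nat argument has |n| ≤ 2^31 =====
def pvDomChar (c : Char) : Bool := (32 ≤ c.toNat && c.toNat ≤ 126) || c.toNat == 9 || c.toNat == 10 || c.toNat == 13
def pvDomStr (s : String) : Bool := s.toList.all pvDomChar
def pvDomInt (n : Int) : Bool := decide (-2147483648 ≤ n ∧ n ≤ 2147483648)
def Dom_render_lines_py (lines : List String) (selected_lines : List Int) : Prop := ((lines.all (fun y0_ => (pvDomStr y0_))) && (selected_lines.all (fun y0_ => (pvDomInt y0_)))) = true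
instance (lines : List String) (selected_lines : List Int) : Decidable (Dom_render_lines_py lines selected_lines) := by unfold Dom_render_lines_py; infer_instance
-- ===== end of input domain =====

-- B renders the selection by grouping the in-range line numbers into contiguous runs and
-- joining the rendered runs with the gap marker as separator, instead of A's stateful
-- prev-tracking single pass that interleaves marker parts; objective: alternative (same cost).

-- lines[line_no - 1] for an in-range (checked) index; shared fetch helper of both ports
def pvGetLine (lines : List String) (ln : Int) : String :=
  (PySem.List.pyGet? lines (ln - 1)).getD ""

-- ===== PORT A =====
-- body of A's loop iteration for an in-range line_no (the 'continue' is the else-branch below)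
def pvStepIn (lines : List String) (st : List String × Option Int) (line_no : Int) :
    List String × Option Int :=
  let parts :=
    match st.2 with
    | some prev => if line_no ≠ prev + 1 then st.1 ++ ["// ..."] else st.1
    | none => st.1
  (parts ++ [pvGetLine lines line_no], some line_no)

def render_lines_py (lines : List String) (selected_lines : List Int) : String :=
  PySem.Str.join "\n"
    (selected_lines.foldl
      (fun st line_no =>
        if 1 ≤ line_no ∧ line_no ≤ (lines.length : Int) then pvStepIn lines st line_no else st)
      ([], none)).1

-- ===== PORT B =====
-- one step of B's run-building loop: extend the last run or start a new one
def pvStepRun (runs : List (List Int)) (ln : Int) : List (List Int) :=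
  match runs.getLast? with
  | some r => if ln = (r.getLast?.getD 0) + 1 then runs.dropLast ++ [r ++ [ln]] else runs ++ [[ln]]
  | none => [[ln]]

def render_lines_py_alt (lines : List String) (selected_lines : List Int) : String :=
  PySem.Str.join ("\n" ++ "// ..." ++ "\n")
    ((((selected_lines.filter (fun ln => decide (1 ≤ ln ∧ ln ≤ (lines.length : Int)))).foldl
        pvStepRun []).map (fun run => PySem.Str.join "\n" (run.map (pvGetLine lines)))))

-- ===== PRECONDITION & SPEC =====
def Spec_render_lines_py (lines : List String) (selected_lines : List Int) (out : String) : Prop := out = render_lines_py_alt lines selected_lines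
instance (lines : List String) (selected_lines : List Int) (out : String) : Decidable (Spec_render_lines_py lines selected_lines out) := by unfold Spec_render_lines_py; infer_instance

-- ===== CLAIM (what is proved, stated in full; the proofs are below) =====
def Claim_equal_render_lines_py : Prop := ∀ (lines : List String) (selected_lines : List Int), Dom_render_lines_py lines selected_lines → Spec_render_lines_py lines selected_lines (render_lines_py lines selected_lines)

-- ===== LEMMAS AND PROOFS =====

-- the parts list A accumulates over a list of (already filtered) line numbers, given prev
def pvPartsOf (lines : List String) : Option Int → List Int → List String
  | _, [] => []
  | prev, ln :: rest =>
      (match prev with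
       | some p => if ln = p + 1 then [] else ["// ..."]
       | none => []) ++ (pvGetLine lines ln :: pvPartsOf lines (some ln) rest)

-- B's grouping as a structural recursion: current run cur (nonempty), its last element, rest
def pvGrp (cur : List Int) (last : Int) : List Int → List (List Int)
  | [] => [cur]
  | y :: ys => if y = last + 1 then pvGrp (cur ++ [y]) y ys else cur :: pvGrp [y] y ys

theorem pvGrp_ne_nil (cur : List Int) (last : Int) (rest : List Int) :
    pvGrp cur last rest ≠ [] := by
  induction rest generalizing cur last with
  | nil => simp [pvGrp]
  | cons y ys ih =>
    simp only [pvGrp]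
    split
    · exact ih _ _
    · simp

-- A's guarded fold equals the unguarded fold over the filtered list
theorem pvFoldl_filter (lines : List String) (xs : List Int) (st : List String × Option Int) :
    xs.foldl (fun st ln =>
        if 1 ≤ ln ∧ ln ≤ (lines.length : Int) then pvStepIn lines st ln else st) st
    = (xs.filter (fun ln => decide (1 ≤ ln ∧ ln ≤ (lines.length : Int)))).foldl
        (pvStepIn lines) st := by
  induction xs generalizing st with
  | nil => rfl
  | cons x xs ih =>
    simp only [List.foldl_cons, List.filter_cons]
    by_cases h : 1 ≤ x ∧ x ≤ (lines.length : Int)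
    · simp [h, ih]
    · simp [h, ih]

-- the parts component of A's fold is the accumulated parts plus pvPartsOf
theorem pvFoldl_parts (lines : List String) (filt : List Int) (parts : List String)
    (prev : Option Int) :
    (filt.foldl (pvStepIn lines) (parts, prev)).1 = parts ++ pvPartsOf lines prev filt := by
  induction filt generalizing parts prev with
  | nil => simp [pvPartsOf]
  | cons ln rest ih =>
    simp only [List.foldl_cons, pvPartsOf]
    cases prev with
    | none => simp [pvStepIn, ih]
    | some p =>
      by_cases h : ln = p + 1
      · simp [pvStepIn, h, ih]
      · simp [pvStepIn, h, ih]

-- Str-level join facts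
theorem pvJoin_singleton (s : String) (x : String) : PySem.Str.join s [x] = x := by
  simp [PySem.Str.join, PySem.Chars.join_singleton, String.ofList_toList]

theorem pvJoin_cons_cons (s p q : String) (rest : List String) :
    PySem.Str.join s (p :: q :: rest) = p ++ s ++ PySem.Str.join s (q :: rest) := by
  simp only [PySem.Str.join, List.map_cons, PySem.Chars.join_cons_cons, String.ofList_append,
    String.ofList_toList, String.append_assoc]

theorem pvJoin_append (s : String) (xs ys : List String) (hx : xs ≠ []) (hy : ys ≠ []) :
    PySem.Str.join s (xs ++ ys) = PySem.Str.join s xs ++ s ++ PySem.Str.join s ys := by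
  induction xs with
  | nil => exact absurd rfl hx
  | cons x xs ih =>
    cases xs with
    | nil =>
      cases ys with
      | nil => exact absurd rfl hy
      | cons y ys => simp [pvJoin_cons_cons, pvJoin_singleton]
    | cons x' xs' =>
      have h1 : (x :: x' :: xs') ++ ys = x :: ((x' :: xs') ++ ys) := by simp
      rw [h1]
      have h2 : (x' :: xs') ++ ys = (x' :: (xs' ++ ys)) := by simp
      rw [h2, pvJoin_cons_cons, ← h2, ih (by simp), pvJoin_cons_cons]
      simp [String.append_assoc]

-- rendering of B's runs
def pvRenderRuns (lines : List String) (runs : List (List Int)) : String :=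
  PySem.Str.join ("\n" ++ "// ..." ++ "\n")
    (runs.map (fun run => PySem.Str.join "\n" (run.map (pvGetLine lines))))

-- B's fold builds exactly pvGrp
theorem pvFoldl_grp (rest : List Int) (runs : List (List Int)) (cur : List Int) (last : Int)
    (hcur : cur.getLast? = some last) :
    rest.foldl pvStepRun (runs ++ [cur]) = runs ++ pvGrp cur last rest := by
  induction rest generalizing runs cur last with
  | nil => simp [pvGrp]
  | cons y ys ih =>
    simp only [List.foldl_cons, pvGrp, pvStepRun, List.getLast?_concat, hcur]
    by_cases h : y = last + 1
    · rw [if_pos (by simpa using h), if_pos h, List.dropLast_concat,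
        ih runs (cur ++ [y]) y List.getLast?_concat]
    · rw [if_neg (by simpa using h), if_neg h, ih (runs ++ [cur]) [y] y rfl]
      simp

-- rendering pvGrp equals joining the corresponding parts of A
theorem pvGrp_render (lines : List String) (rest : List Int) (cur : List Int) (last : Int)
    (hcur : cur ≠ []) :
    pvRenderRuns lines (pvGrp cur last rest)
      = PySem.Str.join "\n" (cur.map (pvGetLine lines) ++ pvPartsOf lines (some last) rest) := by
  induction rest generalizing cur last with
  | nil => simp [pvGrp, pvRenderRuns, pvJoin_singleton, pvPartsOf]
  | cons y ys ih =>
    simp only [pvGrp, pvPartsOf]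
    by_cases h : y = last + 1
    · rw [if_pos h, if_pos h, ih (cur ++ [y]) y (by simp)]
      simp
    · rw [if_neg h, if_neg h]
      obtain ⟨g, gs, hg⟩ := List.exists_cons_of_ne_nil (pvGrp_ne_nil [y] y ys)
      have hrec := ih [y] y (by simp)
      rw [hg] at hrec ⊢
      simp only [pvRenderRuns, List.map_cons] at hrec ⊢
      rw [pvJoin_cons_cons, hrec]
      obtain ⟨c, cs, hc⟩ := List.exists_cons_of_ne_nil hcur
      rw [hc]
      simp only [List.map_nil, List.singleton_append]
      rw [pvJoin_append "\n" _ _ (by simp) (by simp), pvJoin_cons_cons]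
      simp only [String.append_assoc]

-- ===== VERDICT (by name: the statement is the Claim_ definition above) =====
theorem render_lines_py_spec : Claim_equal_render_lines_py := by
  intro lines selected_lines _
  unfold Spec_render_lines_py render_lines_py render_lines_py_alt
  rw [pvFoldl_filter, pvFoldl_parts, List.nil_append]
  cases hf : selected_lines.filter (fun ln => decide (1 ≤ ln ∧ ln ≤ (lines.length : Int))) with
  | nil => simp [pvPartsOf, PySem.Str.join, PySem.Chars.join_nil]
  | cons x xs =>
    have h0 : (x :: xs).foldl pvStepRun ([] : List (List Int))
        = xs.foldl pvStepRun ([] ++ [[x]]) := by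
      simp [pvStepRun]
    rw [h0, pvFoldl_grp xs [] [x] x rfl, List.nil_append]
    have := pvGrp_render lines xs [x] x (by simp)
    rw [pvRenderRuns] at this
    rw [this]
    simp [pvPartsOf]
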